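-- pv_equiv track=rewrite | github.com/CJiu01/BaekJoon_Online_Judge | 백준/Gold/17140. 이차원 배열과 연산/이차원 배열과 연산.py | oper_C
-- ===== SOURCE A (Python) =====
-- from collections import Counter
--
-- def oper_C(arr):
--     trans_arr = []
--
--     for i in range(len(arr[0])):
--         tmp = []
--         for j in range(len(arr)):
--             tmp.append(arr[j][i])
--         counter = Counter(k for k in tmp if k!=0)
--
--         count_vec = []
--         for a,b in counter.items():
--             count_vec.append([a,b])
--
--         count_vec.sort(key= lambda x: (x[1],x[0]))
--         trans_arr.append(count_vec)
--     return trans_arr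
-- ===== SOURCE B (Python) =====
-- def oper_C(arr):
--     res = []
--     for col in zip(*arr):
--         vals = sorted(v for v in col if v != 0)
--         pairs = []
--         for v in vals:
--             if pairs and pairs[-1][0] == v:
--                 pairs[-1][1] += 1
--             else:
--                 pairs.append([v, 1])
--         pairs.sort(key=lambda p: (p[1], p[0]))
--         res.append(pairs)
--     return res
-- ===== Notes on version B (the rewrite author's own statement) =====
-- stated objective: alternative
-- what changed: B drops the Counter/dict entirely: it sorts each column's nonzero values and run-length-encodes the sorted runs into [value,count] pairs before the final (count,value) sort, i.e. sort-then-scan grouping instead of hash counting.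
-- outside the precondition, e.g. on oper_C([]): A raises IndexError, B returns []; on oper_C([[1, 2], [3]]): A raises IndexError, B returns [[[1, 1], [3, 1]]]
import Mathlib
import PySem

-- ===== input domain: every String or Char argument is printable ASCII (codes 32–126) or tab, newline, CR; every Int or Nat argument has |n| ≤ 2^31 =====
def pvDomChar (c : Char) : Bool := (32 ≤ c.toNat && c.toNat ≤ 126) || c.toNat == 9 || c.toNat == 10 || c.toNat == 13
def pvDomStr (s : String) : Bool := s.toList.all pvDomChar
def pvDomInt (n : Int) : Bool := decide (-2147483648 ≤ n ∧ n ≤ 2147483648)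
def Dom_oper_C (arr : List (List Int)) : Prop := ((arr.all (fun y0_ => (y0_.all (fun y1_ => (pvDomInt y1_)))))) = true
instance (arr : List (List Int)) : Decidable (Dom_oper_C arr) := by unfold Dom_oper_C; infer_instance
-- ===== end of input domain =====

-- B replaces A's per-column Counter (hash counting) by sort-then-scan grouping: each
-- column's nonzero values are sorted and run-length-encoded into [value,count] pairs,
-- then sorted by (count,value) — no dict at all (alternative algorithm, similar cost).


-- ===== PORT A =====
def oper_C (arr : List (List Int)) : List (List (List Int)) :=
  (PySem.List.pyRange 0 ((PySem.List.pyGetD arr 0 []).length : Int) 1).foldl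
    (fun trans_arr i =>
      let tmp := (PySem.List.pyRange 0 (arr.length : Int) 1).foldl
        (fun tmp j => tmp ++ [PySem.List.pyGetD (PySem.List.pyGetD arr j []) i 0]) []
      let counter := PySem.Dict.counter (tmp.filter (fun k => k ≠ 0))
      let count_vec := counter.items.foldl (fun cv p => cv ++ [[p.1, p.2]]) []
      trans_arr ++ [PySem.List.sorted2 count_vec
        (fun x => PySem.List.pyGetD x 1 0) (fun x => PySem.List.pyGetD x 0 0)])
    []

-- ===== PORT B =====
-- 'zip(*rows)': columns up to the shortest row length (exact for Python's zip star-unpack)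
def pvZipStar (rows : List (List Int)) : List (List Int) :=
  (List.range (((rows.map List.length).min?).getD 0)).map
    (fun i => rows.map (fun r => r.getD i 0))

-- one step of B's run-length loop: 'if pairs and pairs[-1][0] == v: pairs[-1][1] += 1 else: pairs.append([v, 1])'
def pvRleStep (pairs : List (List Int)) (v : Int) : List (List Int) :=
  match pairs.getLast? with
  | some last =>
      if PySem.List.pyGetD last 0 0 = v
      then pairs.dropLast ++ [[v, PySem.List.pyGetD last 1 0 + 1]]
      else pairs ++ [[v, 1]]
  | none => pairs ++ [[v, 1]]

def oper_C_alt (arr : List (List Int)) : List (List (List Int)) :=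
  (pvZipStar arr).foldl
    (fun res col =>
      let vals := PySem.List.sorted (col.filter (fun v => v ≠ 0)) (fun v => v)
      let pairs := vals.foldl pvRleStep []
      res ++ [PySem.List.sorted2 pairs
        (fun x => PySem.List.pyGetD x 1 0) (fun x => PySem.List.pyGetD x 0 0)])
    []

-- ===== PRECONDITION & SPEC =====
-- Pre_ excludes exactly the inputs where A raises IndexError: the empty list (arr[0])
-- and ragged inputs with some row shorter than the first row (arr[j][i]).
def Pre_oper_C (arr : List (List Int)) : Prop :=
  arr ≠ [] ∧ ∀ r ∈ arr, (arr.headD []).length ≤ r.length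
instance (arr : List (List Int)) : Decidable (Pre_oper_C arr) := by unfold Pre_oper_C; infer_instance
def pvWitness_oper_C : List (List Int) := [[1, 0, 2], [1, 3, 0]]
def Spec_oper_C (arr : List (List Int)) (out : List (List (List Int))) : Prop := out = oper_C_alt arr
instance (arr : List (List Int)) (out : List (List (List Int))) : Decidable (Spec_oper_C arr out) := by unfold Spec_oper_C; infer_instance

-- ===== CLAIM (what is proved, stated in full; the proofs are below) =====
def Claim_equal_oper_C : Prop := ∀ (arr : List (List Int)), Dom_oper_C arr → Pre_oper_C arr → Spec_oper_C arr (oper_C arr)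

-- ===== LEMMAS AND PROOFS =====

-- the lexicographic (count, value) sort key both programs use
def pvKey (x : List Int) : Lex (Int × Int) :=
  toLex (PySem.List.pyGetD x 1 0, PySem.List.pyGetD x 0 0)

-- sorted2 with keys k1, k2 IS sorted with the lexicographic pair key
theorem pvSorted2Lex (xs : List (List Int)) :
    PySem.List.sorted2 xs (fun x => PySem.List.pyGetD x 1 0) (fun x => PySem.List.pyGetD x 0 0)
      = PySem.List.sorted xs pvKey := by
  have hbef : (fun (a b : List Int) =>
        (decide (PySem.List.pyGetD a 1 0 < PySem.List.pyGetD b 1 0) ||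
          (!decide (PySem.List.pyGetD b 1 0 < PySem.List.pyGetD a 1 0) &&
            decide (PySem.List.pyGetD a 0 0 < PySem.List.pyGetD b 0 0))))
      = fun a b => decide (pvKey a < pvKey b) := by
    funext a b
    rcases lt_trichotomy (PySem.List.pyGetD a 1 0) (PySem.List.pyGetD b 1 0) with h | h | h
    · simp [pvKey, Prod.Lex.lt_iff, h, asymm h]
    · simp [pvKey, Prod.Lex.lt_iff, h]
    · simp [pvKey, Prod.Lex.lt_iff, h, asymm h, ne_of_gt h]
  simp only [PySem.List.sorted2, PySem.List.sorted, hbef, Bool.false_eq_true, if_false]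

-- the common normal form: first-occurrence [value, count] table of a list
def pvR (xs : List Int) : List (List Int) :=
  (PySem.Set.ofList xs).map (fun k => [k, (xs.count k : Int)])

-- A's column output
def pvOut (col : List Int) : List (List Int) :=
  PySem.List.sorted2
    ((PySem.Dict.counter (col.filter (fun v => v ≠ 0))).items.map (fun p => [p.1, p.2]))
    (fun x => PySem.List.pyGetD x 1 0) (fun x => PySem.List.pyGetD x 0 0)

-- sorted is determined by the multiset when the keys are pairwise distinct
theorem pvSortedPerm (xs ys : List (List Int)) (h : xs.Perm ys)
    (hk : (xs.map pvKey).Nodup) :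
    PySem.List.sorted xs pvKey = PySem.List.sorted ys pvKey := by
  have hperm : (PySem.List.sorted xs pvKey).Perm xs := PySem.List.sorted_perm xs pvKey false
  have hle : (PySem.List.sorted xs pvKey).Pairwise (fun a b => pvKey a ≤ pvKey b) :=
    PySem.List.sorted_pairwise xs pvKey
  have hnd : ((PySem.List.sorted xs pvKey).map pvKey).Nodup :=
    ((hperm.map pvKey).nodup_iff).mpr hk
  have hne : (PySem.List.sorted xs pvKey).Pairwise (fun a b => pvKey a ≠ pvKey b) :=
    List.pairwise_map.mp hnd
  have hlt : (PySem.List.sorted xs pvKey).Pairwise (fun a b => pvKey a < pvKey b) :=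
    (hle.and hne).imp (fun h => lt_of_le_of_ne h.1 h.2)
  rw [PySem.List.sorted_eq_of_perm_of_pairwise_lt xs _ pvKey hperm hlt,
    PySem.List.sorted_eq_of_perm_of_pairwise_lt ys _ pvKey (hperm.trans h) hlt]

-- reading a two-element literal list
theorem pvGet0 (a b : Int) : PySem.List.pyGetD [a, b] 0 0 = a := by
  simp [PySem.List.pyGetD, PySem.List.pyIdx?, PySem.List.pyGet?]
theorem pvGet1 (a b : Int) : PySem.List.pyGetD [a, b] 1 0 = b := by
  simp [PySem.List.pyGetD, PySem.List.pyIdx?, PySem.List.pyGet?]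

-- the recursive shape of B's run-length loop
def pvRle (w : Int) (c : Int) : List Int → List (List Int)
  | [] => [[w, c]]
  | v :: s => if v = w then pvRle w (c + 1) s else [w, c] :: pvRle v 1 s

theorem pvFoldRle (s : List Int) (acc : List (List Int)) (w c : Int) :
    (s.foldl pvRleStep (acc ++ [[w, c]])) = acc ++ pvRle w c s := by
  induction s generalizing acc w c with
  | nil => simp [pvRle]
  | cons v t ih =>
    have hstep : pvRleStep (acc ++ [[w, c]]) v
        = if v = w then acc ++ [[v, c + 1]] else (acc ++ [[w, c]]) ++ [[v, 1]] := by
      simp only [pvRleStep, List.getLast?_concat, List.dropLast_concat, pvGet0, pvGet1]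
      by_cases hv : v = w
      · subst hv; simp
      · rw [if_neg (Ne.symm hv), if_neg hv]
    by_cases hv : v = w
    · subst hv
      rw [List.foldl_cons, hstep, if_pos rfl, ih]
      simp [pvRle]
    · rw [List.foldl_cons, hstep, if_neg hv, ih]
      simp [pvRle, hv]

-- set() of a nonempty constant list
theorem pvOfListReplicate (w : Int) (n : Nat) (hn : 1 ≤ n) :
    PySem.Set.ofList (List.replicate n w) = [w] := by
  induction n with
  | zero => omega
  | succ m ih =>
    rw [List.replicate_succ, PySem.Set.ofList_cons]
    rcases Nat.eq_zero_or_pos m with hm | hm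
    · subst hm; rfl
    · rw [ih hm]; simp [PySem.Set.discard]

-- peeling the leading run off the count table
theorem pvRCons (w : Int) (xs : List Int) (n : Nat) (hn : 1 ≤ n) (hw : w ∉ xs) :
    pvR (List.replicate n w ++ xs) = [w, (n : Int)] :: pvR xs := by
  have hof : PySem.Set.ofList (List.replicate n w ++ xs) = w :: PySem.Set.ofList xs := by
    rw [PySem.Set.ofList_append, pvOfListReplicate w n hn, PySem.Set.update_eq_append_filter]
    have hfil : List.filter (fun y => !(PySem.Set.contains [w] y)) (PySem.Set.ofList xs)
        = PySem.Set.ofList xs := by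
      apply List.filter_eq_self.mpr
      intro y hy
      have hyw : y ≠ w := by
        intro he; subst he; exact hw ((PySem.Set.mem_ofList _ _).mp hy)
      simp [PySem.Set.contains, hyw]
    rw [hfil]; rfl
  rw [pvR, hof, List.map_cons]
  congr 1
  · congr 1
    rw [List.count_append, List.count_replicate_self, List.count_eq_zero_of_not_mem hw]
    simp
  · rw [pvR]
    apply List.map_congr_left
    intro k hk
    have hkw : w ≠ k := by
      intro he; subst he; exact hw ((PySem.Set.mem_ofList _ _).mp hk)
    rw [List.count_append, List.count_replicate, if_neg (by simpa using hkw)]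
    simp

-- run-length encoding of a ≤-sorted list is its first-occurrence count table
theorem pvRleR (s : List Int) (w : Int) (n : Nat) (hn : 1 ≤ n)
    (h : (List.replicate n w ++ s).Pairwise (· ≤ ·)) :
    pvRle w (n : Int) s = pvR (List.replicate n w ++ s) := by
  induction s generalizing w n with
  | nil =>
    simp only [pvRle, List.append_nil, pvR, pvOfListReplicate w n hn]
    simp [List.count_replicate_self]
  | cons v t ih =>
    by_cases hv : v = w
    · subst hv
      have harr : List.replicate n v ++ v :: t = List.replicate (n + 1) v ++ t := by
        rw [List.replicate_succ']; simp
      have hrec := ih v (n + 1) (by omega) (harr ▸ h)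
      have hcast : ((n : Int) + 1) = ((n + 1 : Nat) : Int) := by omega
      rw [harr, show pvRle v (n : Int) (v :: t) = pvRle v ((n : Int) + 1) t from by
        simp [pvRle], hcast]
      exact hrec
    · have hsub : (v :: t).Pairwise (fun a b : Int => a ≤ b) :=
        List.Pairwise.sublist (List.sublist_append_right (List.replicate n w) (v :: t)) h
      have hle : w ≤ v :=
        (List.pairwise_append.mp h).2.2 w (List.mem_replicate.mpr ⟨by omega, rfl⟩) v (by simp)
      have hwv : w < v := lt_of_le_of_ne hle (Ne.symm hv)
      have hnotin : w ∉ v :: t := by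
        intro hmem
        rcases List.mem_cons.mp hmem with h1 | h1
        · exact hv h1.symm
        · have := (List.pairwise_cons.mp hsub).1 w h1
          omega
      have h1t : List.replicate 1 v ++ t = v :: t := by simp
      have hrec := ih v 1 (le_refl 1) (by rw [h1t]; exact hsub)
      rw [h1t] at hrec
      rw [pvRCons w (v :: t) n hn hnotin,
        show pvRle w (n : Int) (v :: t) = [w, (n : Int)] :: pvRle v 1 t from by
          simp [pvRle, hv]]
      have hrec' : pvRle v 1 t = pvR (v :: t) := by exact_mod_cast hrec
      rw [hrec']

-- A's transposed column read = mapping the row read over the rows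
theorem pvTmp (arr : List (List Int)) (k : Int) :
    (PySem.List.pyRange 0 (arr.length : Int) 1).map
        (fun j => PySem.List.pyGetD (PySem.List.pyGetD arr j []) k 0)
      = arr.map (fun row => PySem.List.pyGetD row k 0) := by
  have h : (PySem.List.pyRange 0 (arr.length : Int) 1).map
        (fun j => PySem.List.pyGetD (PySem.List.pyGetD arr j []) k 0)
      = ((PySem.List.pyRange 0 (arr.length : Int) 1).map
          (fun j => PySem.List.pyGetD arr j [])).map (fun row => PySem.List.pyGetD row k 0) := by
    rw [List.map_map]; rfl
  rw [h, PySem.List.map_pyGetD_pyRange_zero']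

theorem pvA (arr : List (List Int)) (hpre : Pre_oper_C arr) :
    oper_C arr
      = (List.range (arr.headD []).length).map
          (fun k => pvOut (arr.map (fun r => r.getD k 0))) := by
  obtain ⟨hne, hlen⟩ := hpre
  obtain ⟨a0, rest, rfl⟩ := List.exists_cons_of_ne_nil hne
  simp only [oper_C, PySem.List.foldl_append_singleton_eq_map, List.nil_append,
    PySem.List.pyGetD_zero_cons, pvTmp]
  rw [PySem.List.pyRange_one]
  simp only [Int.sub_zero, Int.toNat_natCast, zero_add, List.map_map, List.headD_cons]
  apply List.map_congr_left
  intro k hk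
  simp only [Function.comp, PySem.List.pyGetD_natCast, pvOut]

-- B's per-column computation gives the same sorted table
theorem pvColB (col : List Int) :
    PySem.List.sorted2
        ((PySem.List.sorted (col.filter (fun v => v ≠ 0)) (fun v => v)).foldl pvRleStep [])
        (fun x => PySem.List.pyGetD x 1 0) (fun x => PySem.List.pyGetD x 0 0)
      = pvOut col := by
  have hitems : ((PySem.Dict.counter (col.filter (fun v => v ≠ 0))).items.map
        (fun p => [p.1, p.2])) = pvR (col.filter (fun v => v ≠ 0)) := by
    rw [PySem.Dict.items_counter, List.map_map]; rfl
  rw [pvOut, hitems, pvSorted2Lex, pvSorted2Lex]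
  have hsp : (PySem.List.sorted (col.filter (fun v => v ≠ 0)) (fun v => v)).Perm
      (col.filter (fun v => v ≠ 0)) :=
    PySem.List.sorted_perm (col.filter (fun v => v ≠ 0)) (fun v => v) false
  have hpw : (PySem.List.sorted (col.filter (fun v => v ≠ 0)) (fun v => v)).Pairwise
      (fun a b : Int => a ≤ b) := by
    have := PySem.List.sorted_pairwise (col.filter (fun v => v ≠ 0)) (fun v => v)
    simpa using this
  have hrle : (PySem.List.sorted (col.filter (fun v => v ≠ 0)) (fun v => v)).foldl pvRleStep []
      = pvR (PySem.List.sorted (col.filter (fun v => v ≠ 0)) (fun v => v)) := by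
    rcases hs : PySem.List.sorted (col.filter (fun v => v ≠ 0)) (fun v => v) with _ | ⟨v, t⟩
    · rw [hs]; rfl
    · rw [hs]
      have hpw2 : List.Pairwise (fun a b : Int => a ≤ b) (v :: t) := by rw [← hs]; exact hpw
      have hpw' : (List.replicate 1 v ++ t).Pairwise (fun a b : Int => a ≤ b) := by
        simpa using hpw2
      have h1 : pvRleStep [] v = [] ++ [[v, 1]] := rfl
      rw [List.foldl_cons, h1, pvFoldRle t [] v 1, List.nil_append]
      have hr := pvRleR t v 1 (le_refl 1) hpw'
      have h1t : List.replicate 1 v ++ t = v :: t := by simp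
      rw [h1t] at hr
      exact_mod_cast hr
  rw [hrle]
  have hofperm : (PySem.Set.ofList (PySem.List.sorted (col.filter (fun v => v ≠ 0))
        (fun v => v))).Perm (PySem.Set.ofList (col.filter (fun v => v ≠ 0))) := by
    rw [List.perm_ext_iff_of_nodup (PySem.Set.nodup_ofList _) (PySem.Set.nodup_ofList _)]
    intro a
    rw [PySem.Set.mem_ofList, PySem.Set.mem_ofList, hsp.mem_iff]
  have hRs : pvR (PySem.List.sorted (col.filter (fun v => v ≠ 0)) (fun v => v))
      = (PySem.Set.ofList (PySem.List.sorted (col.filter (fun v => v ≠ 0)) (fun v => v))).map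
          (fun k => [k, ((col.filter (fun v => v ≠ 0)).count k : Int)]) := by
    rw [pvR]
    apply List.map_congr_left
    intro k _
    rw [hsp.count_eq]
  have hperm : (pvR (PySem.List.sorted (col.filter (fun v => v ≠ 0)) (fun v => v))).Perm
      (pvR (col.filter (fun v => v ≠ 0))) := by
    rw [hRs, pvR]
    exact hofperm.map _
  apply pvSortedPerm _ _ hperm
  rw [hRs, List.map_map]
  apply List.Nodup.map _ (PySem.Set.nodup_ofList _)
  intro a b hab
  simp only [Function.comp, pvKey] at hab
  have h2 := toLex_inj.mp hab
  have h3 := congrArg Prod.snd h2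
  simpa [pysem] using h3

theorem pvB (arr : List (List Int)) (hpre : Pre_oper_C arr) :
    oper_C_alt arr
      = (List.range (arr.headD []).length).map
          (fun k => pvOut (arr.map (fun r => r.getD k 0))) := by
  obtain ⟨hne, hlen⟩ := hpre
  obtain ⟨a0, rest, rfl⟩ := List.exists_cons_of_ne_nil hne
  have hmin : ((((a0 :: rest).map List.length).min?).getD 0) = a0.length := by
    rw [List.map_cons, List.min?_cons']
    simp only [Option.getD_some]
    have h1 := (PySem.List.foldl_min_le (rest.map List.length) a0.length).1
    rcases PySem.List.foldl_min_mem (rest.map List.length) a0.length with h2 | h2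
    · exact h2
    · rcases List.mem_map.mp h2 with ⟨r, hr, hrl⟩
      have := hlen r (by simp [hr])
      simp only [List.headD_cons] at this
      omega
  simp only [oper_C_alt, PySem.List.foldl_append_singleton_eq_map, List.nil_append,
    pvZipStar, hmin, List.map_map, List.headD_cons]
  apply List.map_congr_left
  intro k hk
  simp only [Function.comp]
  exact pvColB _

-- ===== VERDICT (by name: the statement is the Claim_ definition above) =====
theorem oper_C_spec : Claim_equal_oper_C := by
  intro arr _ hpre
  unfold Spec_oper_C
  rw [pvA arr hpre, pvB arr hpre]
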